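-- pv_equiv track=rewrite | github.com/pcollinson/unixv6-extras | rdar/rdar.py | visiblemode
-- ===== SOURCE A (Python) =====
-- def visiblemode(mode:int) -> str:
--     """ make a visible representaton of the mode """
--
--     mode = mode & 0o777
--     rmask = 0o400
--     wmask = 0o200
--     xmask = 0o100
--     out = []
--     for _inx in range(3):
--         rval = 'r' if (mode&rmask) != 0 else '-'
--         wval = 'w' if (mode&wmask) != 0 else '-'
--         xval = 'x' if (mode&xmask) != 0 else '-'
--         out.append(rval + wval + xval)
--         rmask = rmask >> 3
--         wmask = wmask >> 3
--         xmask = xmask >> 3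
--     return ''.join(out)
-- ===== SOURCE B (Python) =====
-- def visiblemode(mode: int) -> str:
--     """ make a visible representaton of the mode """
--     triples = ('---', '--x', '-w-', '-wx', 'r--', 'r-x', 'rw-', 'rwx')
--     mode &= 0o777
--     return triples[mode >> 6] + triples[(mode >> 3) & 7] + triples[mode & 7]
-- ===== Notes on version B (the rewrite author's own statement) =====
-- stated objective: alternative
-- what changed: Replaces per-bit testing (a three-iteration loop shifting three masks and appending char-by-char pieces) with a precomputed 8-entry lookup table indexed by each octal digit of the mode: no bit is ever tested, the three digits select whole 'rwx' triples.
import Mathlib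
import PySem

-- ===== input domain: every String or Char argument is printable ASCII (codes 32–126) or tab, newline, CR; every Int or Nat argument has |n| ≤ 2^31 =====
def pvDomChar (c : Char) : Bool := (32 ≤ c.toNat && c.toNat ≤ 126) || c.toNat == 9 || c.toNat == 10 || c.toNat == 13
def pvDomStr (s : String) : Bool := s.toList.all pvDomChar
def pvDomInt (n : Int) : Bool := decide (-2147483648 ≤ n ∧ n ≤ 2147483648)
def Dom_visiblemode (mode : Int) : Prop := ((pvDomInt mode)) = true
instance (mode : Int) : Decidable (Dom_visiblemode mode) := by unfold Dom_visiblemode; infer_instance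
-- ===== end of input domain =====

-- B replaces A's per-bit tests (three-iteration loop with shifting masks) by a
-- precomputed 8-entry table indexed by each octal digit of the mode (alternative; same cost).

-- ===== PORT A =====
-- Python string concatenation rval+wval+xval is ported as PySem.Str.join "" [...] (exact).
def visiblemode (mode : Int) : String :=
  let m := PySem.Int.band mode 511
  let st := (PySem.List.pyRange 0 3 1).foldl
    (fun (st : Int × Int × Int × List String) _ =>
      let rmask := st.1
      let wmask := st.2.1
      let xmask := st.2.2.1
      let out := st.2.2.2
      let rval := if PySem.Int.band m rmask ≠ 0 then "r" else "-"
      let wval := if PySem.Int.band m wmask ≠ 0 then "w" else "-"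
      let xval := if PySem.Int.band m xmask ≠ 0 then "x" else "-"
      (rmask >>> 3, wmask >>> 3, xmask >>> 3,
        out ++ [PySem.Str.join "" [rval, wval, xval]]))
    (256, 128, 64, ([] : List String))
  PySem.Str.join "" st.2.2.2

-- ===== PORT B =====
-- After masking with 0o777, each tuple index (m>>6, (m>>3)&7, m&7) lies in 0..7, so the
-- Python indexing never raises; pyGet? … .getD "" is exact on every input. String ++ is
-- exact for Python's str +.
def visiblemode_alt (mode : Int) : String :=
  let triples : List String := ["---", "--x", "-w-", "-wx", "r--", "r-x", "rw-", "rwx"]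
  let m := PySem.Int.band mode 511
  ((PySem.List.pyGet? triples (m >>> 6)).getD "")
    ++ ((PySem.List.pyGet? triples (PySem.Int.band (m >>> 3) 7)).getD "")
    ++ ((PySem.List.pyGet? triples (PySem.Int.band m 7)).getD "")

-- ===== PRECONDITION & SPEC =====
def Spec_visiblemode (mode : Int) (out : String) : Prop := out = visiblemode_alt mode
instance (mode : Int) (out : String) : Decidable (Spec_visiblemode mode out) := by unfold Spec_visiblemode; infer_instance

-- ===== CLAIM (what is proved, stated in full; the proofs are below) =====
def Claim_equal_visiblemode : Prop := ∀ (mode : Int), Dom_visiblemode mode → Spec_visiblemode mode (visiblemode mode)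

-- ===== LEMMAS AND PROOFS =====
-- Both ports are functions of m := mode & 0o777 alone; masking with 511 always yields a
-- natural number below 512, so the equality is checked once for each of the 512 residues.

-- A's and B's bodies after the mask, abstracted over the masked value.
def pvACore (m : Int) : String :=
  let st := (PySem.List.pyRange 0 3 1).foldl
    (fun (st : Int × Int × Int × List String) _ =>
      let rmask := st.1
      let wmask := st.2.1
      let xmask := st.2.2.1
      let out := st.2.2.2
      let rval := if PySem.Int.band m rmask ≠ 0 then "r" else "-"
      let wval := if PySem.Int.band m wmask ≠ 0 then "w" else "-"
      let xval := if PySem.Int.band m xmask ≠ 0 then "x" else "-"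
      (rmask >>> 3, wmask >>> 3, xmask >>> 3,
        out ++ [PySem.Str.join "" [rval, wval, xval]]))
    (256, 128, 64, ([] : List String))
  PySem.Str.join "" st.2.2.2

def pvBCore (m : Int) : String :=
  let triples : List String := ["---", "--x", "-w-", "-wx", "r--", "r-x", "rw-", "rwx"]
  ((PySem.List.pyGet? triples (m >>> 6)).getD "")
    ++ ((PySem.List.pyGet? triples (PySem.Int.band (m >>> 3) 7)).getD "")
    ++ ((PySem.List.pyGet? triples (PySem.Int.band m 7)).getD "")

theorem pvA_eq_core (mode : Int) : visiblemode mode = pvACore (PySem.Int.band mode 511) := rfl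

theorem pvB_eq_core (mode : Int) : visiblemode_alt mode = pvBCore (PySem.Int.band mode 511) := rfl

-- mode & 511 is a natural number below 512, for every Int mode.
theorem pvMask_lt (mode : Int) : ∃ n : Nat, n < 512 ∧ PySem.Int.band mode 511 = (n : Int) := by
  unfold PySem.Int.band
  split_ifs with h1 h2
  · exact ⟨mode.toNat &&& 511, by
      have := Nat.and_le_right (n := mode.toNat) (m := 511); omega, rfl⟩
  · omega
  · exact ⟨511 - (511 &&& (-mode - 1).toNat), by omega, rfl⟩
  · omega

set_option maxRecDepth 8192 in
set_option maxHeartbeats 2000000 in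
theorem pvCore_eq : ∀ k : Fin 512, pvACore (k.val : Int) = pvBCore (k.val : Int) := by decide

-- ===== VERDICT (by name: the statement is the Claim_ definition above) =====
theorem visiblemode_spec : Claim_equal_visiblemode := by
  intro mode _
  show visiblemode mode = visiblemode_alt mode
  obtain ⟨n, hn, he⟩ := pvMask_lt mode
  rw [pvA_eq_core, pvB_eq_core, he]
  exact pvCore_eq ⟨n, hn⟩
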